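-- pv_equiv track=rewrite | github.com/maia13/aoc-2020 | day17b/program_lib.py | count_actives
-- ===== SOURCE A (Python) =====
-- def is_active(cubes, x, y, z, w):
--    return (x, y, z, w) in cubes and cubes[(x, y, z, w)] == '#'
--
-- def count_actives(cubes, minX, maxX, minY, maxY, minZ, maxZ, minW, maxW):
--    c = 0
--    for x in range(minX, maxX):
--       for y in range(minY, maxY):
--          for z in range(minZ, maxZ):
--             for w in range(minW, maxW):
--                if is_active(cubes, x, y, z, w):
--                   c += 1
--    return c
-- ===== SOURCE B (Python) =====
-- def count_actives(cubes, minX, maxX, minY, maxY, minZ, maxZ, minW, maxW):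
--     bounds = [(minX, maxX), (minY, maxY), (minZ, maxZ), (minW, maxW)]
--     c = 0
--     for pos, state in cubes.items():
--         if state == '#' and len(pos) == 4 and all(
--                 lo <= v < hi for v, (lo, hi) in zip(pos, bounds)):
--             c += 1
--     return c
-- ===== Notes on version B (the rewrite author's own statement) =====
-- stated objective: alternative
-- what changed: Instead of scanning every lattice point of the 4D bounding box and looking each one up in the dict, B iterates once over the dict's entries and counts the '#' cells whose coordinates lie inside the bounds.
import Mathlib
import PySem

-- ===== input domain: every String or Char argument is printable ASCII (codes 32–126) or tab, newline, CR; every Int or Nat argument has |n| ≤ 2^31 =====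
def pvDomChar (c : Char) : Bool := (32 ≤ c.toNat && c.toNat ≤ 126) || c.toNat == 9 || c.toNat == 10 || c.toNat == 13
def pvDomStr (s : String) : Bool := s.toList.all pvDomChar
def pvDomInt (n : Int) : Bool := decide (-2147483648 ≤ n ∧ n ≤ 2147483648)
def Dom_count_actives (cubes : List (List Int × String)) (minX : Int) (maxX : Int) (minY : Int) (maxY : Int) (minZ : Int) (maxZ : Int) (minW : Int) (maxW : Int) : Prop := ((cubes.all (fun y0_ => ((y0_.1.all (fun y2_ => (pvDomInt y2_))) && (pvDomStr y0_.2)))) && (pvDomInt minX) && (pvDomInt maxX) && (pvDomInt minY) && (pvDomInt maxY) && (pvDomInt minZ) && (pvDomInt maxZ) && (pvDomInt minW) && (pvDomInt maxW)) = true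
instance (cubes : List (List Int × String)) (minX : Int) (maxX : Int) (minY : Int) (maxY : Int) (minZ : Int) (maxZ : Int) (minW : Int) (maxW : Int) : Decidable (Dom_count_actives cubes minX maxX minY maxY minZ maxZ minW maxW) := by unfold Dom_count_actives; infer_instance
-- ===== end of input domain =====

-- B replaces A's scan of every lattice point of the 4D bounding box (each looked up in the dict) by a
-- single pass over the dict's entries, counting '#' cells whose coordinates lie within the bounds.

-- ===== PORT A =====
-- '(x, y, z, w) in cubes and cubes[(x, y, z, w)] == "#"': the membership test plus the (then never
-- failing) lookup is exactly 'get? = some "#"', read off the single get?.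
def is_active (cubes : List (List Int × String)) (x y z w : Int) : Bool :=
  match (PySem.Dict.mk cubes).get? [x, y, z, w] with
  | some v => v == "#"
  | none => false

def count_actives (cubes : List (List Int × String)) (minX : Int) (maxX : Int) (minY : Int) (maxY : Int) (minZ : Int) (maxZ : Int) (minW : Int) (maxW : Int) : Int :=
  (PySem.List.pyRange minX maxX 1).foldl (fun c x =>
    (PySem.List.pyRange minY maxY 1).foldl (fun c y =>
      (PySem.List.pyRange minZ maxZ 1).foldl (fun c z =>
        (PySem.List.pyRange minW maxW 1).foldl (fun c w =>
          if is_active cubes x y z w then c + 1 else c) c) c) c) 0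

-- ===== PORT B =====
-- 'len(pos) == 4 and all(lo <= v < hi for v, (lo, hi) in zip(pos, bounds))' of Source B
def pv_in_bounds (pos : List Int) (minX maxX minY maxY minZ maxZ minW maxW : Int) : Bool :=
  match pos with
  | [x, y, z, w] =>
      decide (minX ≤ x) && decide (x < maxX) && decide (minY ≤ y) && decide (y < maxY) &&
      decide (minZ ≤ z) && decide (z < maxZ) && decide (minW ≤ w) && decide (w < maxW)
  | _ => false

def count_actives_alt (cubes : List (List Int × String)) (minX : Int) (maxX : Int) (minY : Int) (maxY : Int) (minZ : Int) (maxZ : Int) (minW : Int) (maxW : Int) : Int :=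
  cubes.foldl (fun c kv =>
    if kv.2 == "#" && pv_in_bounds kv.1 minX maxX minY maxY minZ maxZ minW maxW then c + 1 else c) 0

-- ===== PRECONDITION & SPEC =====
-- Pre_ excludes association lists with duplicate keys: they cannot arise from a Python dict (the
-- actual argument type), and on them A's first-match lookup and B's per-entry count may disagree.
def Pre_count_actives (cubes : List (List Int × String)) (minX : Int) (maxX : Int) (minY : Int) (maxY : Int) (minZ : Int) (maxZ : Int) (minW : Int) (maxW : Int) : Prop :=
  (cubes.map Prod.fst).Nodup
instance (cubes : List (List Int × String)) (minX : Int) (maxX : Int) (minY : Int) (maxY : Int) (minZ : Int) (maxZ : Int) (minW : Int) (maxW : Int) : Decidable (Pre_count_actives cubes minX maxX minY maxY minZ maxZ minW maxW) := by unfold Pre_count_actives; infer_instance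

def pvWitness_count_actives : (List (List Int × String)) × Int × Int × Int × Int × Int × Int × Int × Int :=
  ([([0, 0, 0, 0], "#"), ([1, 0, 0, 0], ".")], 0, 2, 0, 1, 0, 1, 0, 1)

def Spec_count_actives (cubes : List (List Int × String)) (minX : Int) (maxX : Int) (minY : Int) (maxY : Int) (minZ : Int) (maxZ : Int) (minW : Int) (maxW : Int) (out : Int) : Prop := out = count_actives_alt cubes minX maxX minY maxY minZ maxZ minW maxW
instance (cubes : List (List Int × String)) (minX : Int) (maxX : Int) (minY : Int) (maxY : Int) (minZ : Int) (maxZ : Int) (minW : Int) (maxW : Int) (out : Int) : Decidable (Spec_count_actives cubes minX maxX minY maxY minZ maxZ minW maxW out) := by unfold Spec_count_actives; infer_instance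

-- ===== CLAIM (what is proved, stated in full; the proofs are below) =====
def Claim_equal_count_actives : Prop := ∀ (cubes : List (List Int × String)) (minX : Int) (maxX : Int) (minY : Int) (maxY : Int) (minZ : Int) (maxZ : Int) (minW : Int) (maxW : Int), Dom_count_actives cubes minX maxX minY maxY minZ maxZ minW maxW → Pre_count_actives cubes minX maxX minY maxY minZ maxZ minW maxW → Spec_count_actives cubes minX maxX minY maxY minZ maxZ minW maxW (count_actives cubes minX maxX minY maxY minZ maxZ minW maxW)

-- ===== LEMMAS AND PROOFS =====

-- the list of lattice points of the bounding box, as A enumerates them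
def pvBox (minX maxX minY maxY minZ maxZ minW maxW : Int) : List (List Int) :=
  (PySem.List.pyRange minX maxX 1).flatMap (fun x =>
    (PySem.List.pyRange minY maxY 1).flatMap (fun y =>
      (PySem.List.pyRange minZ maxZ 1).flatMap (fun z =>
        (PySem.List.pyRange minW maxW 1).map (fun w => [x, y, z, w]))))

theorem pvBox_eq (minX maxX minY maxY minZ maxZ minW maxW : Int) :
    pvBox minX maxX minY maxY minZ maxZ minW maxW
      = ((PySem.List.pyRange minX maxX 1 ×ˢ (PySem.List.pyRange minY maxY 1 ×ˢ (PySem.List.pyRange minZ maxZ 1 ×ˢ PySem.List.pyRange minW maxW 1))).map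
          (fun p => [p.1, p.2.1, p.2.2.1, p.2.2.2])) := by
  simp [pvBox, SProd.sprod, List.product, List.map_flatMap, Function.comp_def]

theorem pvBox_nodup (minX maxX minY maxY minZ maxZ minW maxW : Int) :
    (pvBox minX maxX minY maxY minZ maxZ minW maxW).Nodup := by
  rw [pvBox_eq]
  apply List.Nodup.map
  · intro p q hpq
    simp at hpq
    obtain ⟨h1, h2, h3, h4⟩ := hpq
    exact Prod.ext h1 (Prod.ext h2 (Prod.ext h3 h4))
  · exact (PySem.List.nodup_pyRange_one _ _).product
      ((PySem.List.nodup_pyRange_one _ _).product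
        ((PySem.List.nodup_pyRange_one _ _).product (PySem.List.nodup_pyRange_one _ _)))

theorem pv_nested (minX maxX minY maxY minZ maxZ minW maxW : Int) (G : List Int → Int) :
    ((PySem.List.pyRange minX maxX 1).map (fun x =>
      ((PySem.List.pyRange minY maxY 1).map (fun y =>
        ((PySem.List.pyRange minZ maxZ 1).map (fun z =>
          ((PySem.List.pyRange minW maxW 1).map (fun w => G [x, y, z, w])).sum)).sum)).sum)).sum
    = ((pvBox minX maxX minY maxY minZ maxZ minW maxW).map G).sum := by
  simp [pvBox, List.flatMap_def, List.sum_flatten, List.map_map, Function.comp_def]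

theorem pvBox_mem (minX maxX minY maxY minZ maxZ minW maxW : Int) (k : List Int) :
    decide (k ∈ pvBox minX maxX minY maxY minZ maxZ minW maxW)
      = pv_in_bounds k minX maxX minY maxY minZ maxZ minW maxW := by
  rcases k with _ | ⟨x, _ | ⟨y, _ | ⟨z, _ | ⟨w, _ | ⟨v, t⟩⟩⟩⟩⟩ <;>
    simp [pvBox, pv_in_bounds, List.mem_flatMap, PySem.List.mem_pyRange_one] ;
    (try simp [Bool.and_assoc])

-- a 0/1-sum of a point indicator over a duplicate-free list
theorem pv_sum_ind {α : Type} [DecidableEq α] (l : List α) (k : α) (h : l.Nodup) :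
    (l.map (fun p => if p = k then (1:Int) else 0)).sum = if k ∈ l then 1 else 0 := by
  induction l with
  | nil => simp
  | cons a t ih =>
    simp only [List.map_cons, List.sum_cons, List.nodup_cons] at *
    rcases h with ⟨ha, ht⟩
    by_cases hak : a = k
    · subst hak; simp [ha, ih ht]
    · simp [hak, ih ht, List.mem_cons, Ne.symm hak]

-- core: sum of A's lookup indicator over any duplicate-free point list = B's count restricted to it
theorem pv_core (box : List (List Int)) (hbox : box.Nodup) :
    ∀ (cubes : List (List Int × String)), (cubes.map Prod.fst).Nodup →
      (box.map (fun p => if (match (PySem.Dict.mk cubes).get? p with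
                             | some v => v == "#" | none => false) then (1:Int) else 0)).sum
        = (cubes.countP (fun kv => kv.2 == "#" && decide (kv.1 ∈ box)) : Int) := by
  intro cubes
  induction cubes with
  | nil => intro _; simp [PySem.Dict.get?]
  | cons kv t ih =>
    intro hnd
    obtain ⟨k, v⟩ := kv
    simp only [List.map_cons, List.nodup_cons] at hnd
    obtain ⟨hk, ht⟩ := hnd
    have hnone : (PySem.Dict.mk t).get? k = none := by
      rw [PySem.Dict.get?_eq_none_iff_not_mem_keys]
      simpa [PySem.Dict.keys_mk] using hk
    have hpt : ∀ p : List Int,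
        (if (match (PySem.Dict.mk ((k, v) :: t)).get? p with
             | some v => v == "#" | none => false) then (1:Int) else 0)
        = (if (match (PySem.Dict.mk t).get? p with
               | some v => v == "#" | none => false) then (1:Int) else 0)
          + (if v = "#" then (if p = k then (1:Int) else 0) else 0) := by
      intro p
      rw [PySem.Dict.get?_mk_cons]
      by_cases hpk : k = p
      · subst hpk
        simp [hnone, beq_iff_eq]
      · simp [hpk]
        intro _ h
        exact hpk h.symm
    rw [List.map_congr_left (fun p _ => hpt p), PySem.List.sum_map_add_int, ih ht,
        List.countP_cons]
    by_cases hv : v = "#"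
    · simp only [hv, if_true]
      rw [pv_sum_ind box k hbox]
      push_cast
      by_cases hkb : k ∈ box <;> simp [hkb]
    · simp [hv]



-- ===== VERDICT (by name: the statement is the Claim_ definition above) =====
theorem count_actives_spec : Claim_equal_count_actives := by
  unfold Claim_equal_count_actives
  intro cubes minX maxX minY maxY minZ maxZ minW maxW _ hpre
  unfold Spec_count_actives
  unfold Pre_count_actives at hpre
  rw [count_actives, count_actives_alt]
  rw [PySem.List.foldl_if_add_one]
  simp only [PySem.List.foldl_if_add_one, PySem.List.foldl_add, ← PySem.List.sum_map_ite_one_zero]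
  rw [zero_add, zero_add]
  have hG : ∀ x y z w : Int,
      (if is_active cubes x y z w then (1:Int) else 0)
        = (fun p => if (match (PySem.Dict.mk cubes).get? p with
                        | some v => v == "#" | none => false) then (1:Int) else 0) [x, y, z, w] := by
    intro x y z w; rfl
  simp only [hG]
  have hb := pv_nested minX maxX minY maxY minZ maxZ minW maxW
      (fun p => if (match (PySem.Dict.mk cubes).get? p with
                    | some v => v == "#" | none => false) then (1:Int) else 0)
  simp only [] at hb
  rw [hb]
  rw [pv_core _ (pvBox_nodup minX maxX minY maxY minZ maxZ minW maxW) cubes hpre]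
  rw [PySem.List.sum_map_ite_one_zero]
  congr 1
  apply List.countP_congr
  intro kv _
  rw [← pvBox_mem minX maxX minY maxY minZ maxZ minW maxW kv.1]
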